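-- pv_equiv track=rewrite | github.com/calvinburkholder/CSCI280-HW6-PART1 | HW6_tests.py | turnips
-- ===== SOURCE A (Python) =====
-- def turnips(q):
--     n = len(q)
--     if n == 0:
--         return 0
--     memo = [0]*(n+1)
--
--     memo[0] = 0
--     if n >= 1:
--         memo[1] = q[0]
--     if n >= 2:
--         memo[2] = q[1]
--
--     for i in range(3, n+1):
--         memo[i] = q[i-1] + max(memo[:i-2])
--
--     return max(memo)
-- ===== SOURCE B (Python) =====
-- def turnips(q):
--     n = len(q)
--     if n == 0:
--         return 0
--     if n == 1:
--         return max(0, q[0])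
--     # pm = best sum using picks among memo[0..i-3]; prev2/prev1 = memo[i-2], memo[i-1]
--     pm, prev2, prev1 = 0, q[0], q[1]
--     ans = max(0, q[0], q[1])
--     for qi in q[2:]:
--         cur = qi + pm
--         pm, prev2, prev1 = max(pm, prev2), prev1, cur
--         ans = max(ans, cur)
--     return ans
-- ===== Notes on version B (the rewrite author's own statement) =====
-- stated objective: faster
-- what changed: B replaces A's per-step rescan max(memo[:i-2]) over the whole memo prefix by a running prefix maximum carried in O(1) state (pm, prev2, prev1, ans), turning the quadratic DP into a single linear pass.
import Mathlib
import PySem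

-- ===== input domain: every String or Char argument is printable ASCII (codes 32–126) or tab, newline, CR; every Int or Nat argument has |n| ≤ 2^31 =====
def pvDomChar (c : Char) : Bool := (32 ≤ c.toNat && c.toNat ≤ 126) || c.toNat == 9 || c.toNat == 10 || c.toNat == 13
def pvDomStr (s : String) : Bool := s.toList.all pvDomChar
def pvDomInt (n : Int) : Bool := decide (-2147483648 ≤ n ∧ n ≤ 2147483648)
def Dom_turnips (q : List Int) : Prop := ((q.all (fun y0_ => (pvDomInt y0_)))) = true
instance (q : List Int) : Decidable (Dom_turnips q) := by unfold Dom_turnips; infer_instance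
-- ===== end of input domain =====

-- B replaces A's per-step rescan max(memo[:i-2]) by a running prefix maximum in O(1) state: one linear pass.

-- ===== PORT A =====
-- Python max(xs); raises on []; every call site in A passes a nonempty list, so the [] case is unreachable.
def pymax (xs : List Int) : Int :=
  match xs with
  | [] => 0
  | a :: t => t.foldl max a

-- the loop body: memo[i] = q[i-1] + max(memo[:i-2]); q.getD (i-1) 0 is exact since 3 ≤ i ≤ n keeps i-1 in range
def stepA (q : List Int) (m : List Int) (i : Nat) : List Int :=
  m.set i (q.getD (i-1) 0 + pymax (m.take (i-2)))

def turnips (q : List Int) : Int :=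
  let n := q.length
  if n = 0 then 0 else
  let memo := List.replicate (n+1) (0:Int)
  let memo := memo.set 0 0
  let memo := if 1 ≤ n then memo.set 1 (q.getD 0 0) else memo
  let memo := if 2 ≤ n then memo.set 2 (q.getD 1 0) else memo
  let memo := (List.range' 3 (n+1-3)).foldl (stepA q) memo
  pymax memo

-- ===== PORT B =====
-- state (pm, prev2, prev1, ans)
def stepB (s : Int × Int × Int × Int) (qi : Int) : Int × Int × Int × Int :=
  let cur := qi + s.1
  (max s.1 s.2.1, s.2.2.1, cur, max s.2.2.2 cur)

def turnips_alt (q : List Int) : Int :=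
  match q with
  | [] => 0
  | [x] => max 0 x
  | x :: y :: rest =>
    (rest.foldl stepB (0, x, y, max (max 0 x) y)).2.2.2

-- ===== PRECONDITION & SPEC =====
def Spec_turnips (q : List Int) (out : Int) : Prop := out = turnips_alt q
instance (q : List Int) (out : Int) : Decidable (Spec_turnips q out) := by unfold Spec_turnips; infer_instance

-- ===== CLAIM (what is proved, stated in full; the proofs are below) =====
def Claim_equal_turnips : Prop := ∀ (q : List Int), Dom_turnips q → Spec_turnips q (turnips q)

-- ===== LEMMAS AND PROOFS =====

-- append-based reformulation of A's memo construction
def buildC : List Int → List Int → List Int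
  | p, [] => p
  | p, a :: r => buildC (p ++ [a + pymax (p.take (p.length - 2))]) r

theorem pymax_append (l : List Int) (y : Int) (h : l ≠ []) :
    pymax (l ++ [y]) = max (pymax l) y := by
  cases l with
  | nil => exact absurd rfl h
  | cons a t => simp [pymax, List.foldl_append]

theorem take_set_succ (m : List Int) (i : Nat) (v : Int) (h : i < m.length) :
    (m.set i v).take (i+1) = m.take i ++ [v] := by
  rw [List.set_eq_take_append_cons_drop, if_pos h, List.take_append]
  simp [List.length_take, Nat.min_eq_left (le_of_lt h)]

-- A's set-based loop, started at index i on a memo of length i+k, equals buildC on the prefix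
theorem loopA_eq_buildC (q : List Int) :
    ∀ (k i : Nat) (m : List Int), 3 ≤ i → m.length = i + k → k = q.length + 1 - i →
      i ≤ q.length + 1 →
      (List.range' i k).foldl (stepA q) m = buildC (m.take i) (q.drop (i-1)) := by
  intro k
  induction k with
  | zero =>
    intro i m h3 hlen hk hle
    have hd : q.drop (i-1) = [] := List.drop_eq_nil_of_le (by omega)
    have ht : m.take i = m := List.take_of_length_le (by omega)
    simp [hd, ht, buildC]
  | succ k ih =>
    intro i m h3 hlen hk hle
    obtain ⟨j, rfl⟩ : ∃ j, i = j + 3 := ⟨i - 3, by omega⟩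
    have hiq : j + 2 < q.length := by omega
    rw [List.range'_succ, List.foldl_cons,
        ih (j+3+1) (stepA q m (j+3)) (by omega) (by simp [stepA]; omega) (by omega) (by omega)]
    have hset : (stepA q m (j+3)).take (j+3+1)
        = m.take (j+3) ++ [q.getD (j+3-1) 0 + pymax (m.take (j+3-2))] := by
      unfold stepA
      exact take_set_succ m (j+3) _ (by omega)
    have hdrop : q.drop (j+3-1) = q[j+2] :: q.drop (j+3) := by
      have h := List.drop_eq_getElem_cons hiq
      simp only [show j+2+1 = j+3 from rfl] at h
      exact h
    rw [hset, hdrop]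
    show buildC (m.take (j+3) ++ [_]) (q.drop (j+3)) = _
    rw [buildC]
    have hplen : (m.take (j+3)).length = j + 3 := by
      simp [List.length_take]; omega
    rw [hplen]
    have htk : (m.take (j+3)).take (j+3-2) = m.take (j+3-2) := by
      rw [List.take_take]; congr 1; omega
    have hval : q.getD (j+3-1) 0 = q[j+2] := by
      simp only [show j+3-1 = j+2 from by omega]
      exact List.getD_eq_getElem q 0 hiq
    rw [htk, hval]

-- B's fold computes the running max of buildC's list
theorem foldB_eq_buildC :
    ∀ (r p₀ : List Int) (u v : Int), p₀ ≠ [] →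
      (r.foldl stepB (pymax p₀, u, v, pymax (p₀ ++ [u, v]))).2.2.2
        = pymax (buildC (p₀ ++ [u, v]) r) := by
  intro r
  induction r with
  | nil => intro p₀ u v h; simp [buildC]
  | cons a r ih =>
    intro p₀ u v h
    have h1 : pymax (p₀ ++ [u]) = max (pymax p₀) u := pymax_append p₀ u h
    have h2 : pymax (p₀ ++ [u, v, a + pymax p₀])
        = max (pymax (p₀ ++ [u, v])) (a + pymax p₀) := by
      have h := pymax_append (p₀ ++ [u, v]) (a + pymax p₀) (by simp)
      simp only [List.append_assoc, List.cons_append, List.nil_append] at h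
      exact h
    have hstep : stepB (pymax p₀, u, v, pymax (p₀ ++ [u, v])) a
        = (pymax (p₀ ++ [u]), v, a + pymax p₀, pymax ((p₀ ++ [u]) ++ [v, a + pymax p₀])) := by
      simp [stepB, h1, h2]
    rw [List.foldl_cons, hstep, ih (p₀ ++ [u]) v (a + pymax p₀) (by simp)]
    show _ = pymax (buildC (p₀ ++ [u, v]) (a :: r))
    rw [buildC]
    have hlen : (p₀ ++ [u, v]).length - 2 = p₀.length := by simp
    have htake : (p₀ ++ [u, v]).take ((p₀ ++ [u, v]).length - 2) = p₀ := by
      rw [hlen]; exact List.take_left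
    rw [htake]
    congr 1
    simp

-- ===== VERDICT (by name: the statement is the Claim_ definition above) =====
theorem turnips_spec : Claim_equal_turnips := by
  intro q _
  unfold Spec_turnips
  match q with
  | [] => rfl
  | [x] =>
    simp [turnips, turnips_alt, pymax]
  | x :: y :: rest =>
    have hn : (x :: y :: rest).length = rest.length + 2 := by simp
    unfold turnips
    simp only [hn]
    rw [if_neg (by omega : ¬ (rest.length + 2 = 0)), if_pos (by omega), if_pos (by omega)]
    have hm : ((((List.replicate (rest.length + 2 + 1) (0:Int)).set 0 0).set 1
          ((x :: y :: rest).getD 0 0)).set 2 ((x :: y :: rest).getD 1 0))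
        = 0 :: x :: y :: List.replicate rest.length 0 := by
      simp [List.replicate_succ, List.set]
    rw [hm]
    rw [loopA_eq_buildC (x :: y :: rest) (rest.length + 2 + 1 - 3) 3
      (0 :: x :: y :: List.replicate rest.length 0) (by omega) (by simp; omega)
      (by simp) (by simp)]
    have ht3 : (0 :: x :: y :: List.replicate rest.length (0:Int)).take 3 = [0, x, y] := by
      simp
    have hd2 : (x :: y :: rest).drop 2 = rest := by simp
    rw [ht3]
    norm_num [hd2]
    have hB := foldB_eq_buildC rest [0] x y (by simp)
    have hinit : pymax ([(0:Int)] ++ [x, y]) = max (max 0 x) y := by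
      simp [pymax]
    have hp0 : pymax [(0:Int)] = 0 := rfl
    rw [hinit, hp0] at hB
    show pymax (buildC ([0] ++ [x, y]) rest) = turnips_alt (x :: y :: rest)
    rw [← hB]
    rfl
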